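-- pv_equiv track=rewrite | github.com/FDI-IT/fd | one_off/migration_utils.py | jil_key_order
-- ===== SOURCE A (Python) =====
-- def jil_key_order(jil_dict):
--     key_list = sorted(jil_dict.keys())
--     a=[];b=[];c=[];
--     for k in key_list:
--         if k < 20000:
--             a.append(k)
--         elif k < 30000:
--             c.append(k)
--         else:
--             b.append(k)
--
--     return a+b+c
-- ===== SOURCE B (Python) =====
-- def jil_key_order(jil_dict):
--     # one keyed sort: bucket priority (a:0, b:1, c:2), tie-broken by the key
--     return sorted(jil_dict.keys(),
--                   key=lambda k: (0 if k < 20000 else 2 if k < 30000 else 1, k))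
-- ===== Notes on version B (the rewrite author's own statement) =====
-- stated objective: simpler
-- what changed: Replaces the sort-then-three-bucket-partition-then-concatenate loop with a single sorted() call whose composite key (bucket priority, key) yields the same order directly.
import Mathlib
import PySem

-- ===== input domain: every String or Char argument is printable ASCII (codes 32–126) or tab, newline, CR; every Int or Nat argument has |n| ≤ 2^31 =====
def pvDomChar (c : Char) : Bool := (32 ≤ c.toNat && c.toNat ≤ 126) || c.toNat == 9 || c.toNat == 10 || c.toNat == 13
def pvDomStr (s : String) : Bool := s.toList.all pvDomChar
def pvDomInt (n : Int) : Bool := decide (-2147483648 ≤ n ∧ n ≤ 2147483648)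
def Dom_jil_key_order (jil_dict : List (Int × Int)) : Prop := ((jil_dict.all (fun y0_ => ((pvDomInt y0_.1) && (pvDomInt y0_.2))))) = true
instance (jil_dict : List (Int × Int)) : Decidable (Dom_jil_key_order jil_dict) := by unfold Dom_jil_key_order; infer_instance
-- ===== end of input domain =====

-- B replaces A's sort-then-three-bucket-partition with a single sorted() call on a
-- composite (bucket priority, key) key — simpler, same asymptotic cost.

-- ===== PORT A =====
def jil_key_order (jil_dict : List (Int × Int)) : List Int :=
  let key_list := PySem.List.sorted (PySem.Dict.ofList jil_dict).keys (fun k => k) false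
  let abc := key_list.foldl
    (fun (acc : List Int × List Int × List Int) k =>
      if k < 20000 then (acc.1 ++ [k], acc.2.1, acc.2.2)
      else if k < 30000 then (acc.1, acc.2.1, acc.2.2 ++ [k])
      else (acc.1, acc.2.1 ++ [k], acc.2.2))
    ([], [], [])
  abc.1 ++ abc.2.1 ++ abc.2.2

-- ===== PORT B =====
def jil_key_order_alt (jil_dict : List (Int × Int)) : List Int :=
  PySem.List.sorted2 (PySem.Dict.ofList jil_dict).keys
    (fun k => if k < 20000 then (0 : Int) else if k < 30000 then 2 else 1)
    (fun k => k) false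

-- ===== PRECONDITION & SPEC =====
def Spec_jil_key_order (jil_dict : List (Int × Int)) (out : List Int) : Prop := out = jil_key_order_alt jil_dict
instance (jil_dict : List (Int × Int)) (out : List Int) : Decidable (Spec_jil_key_order jil_dict out) := by unfold Spec_jil_key_order; infer_instance

-- ===== CLAIM (what is proved, stated in full; the proofs are below) =====
def Claim_equal_jil_key_order : Prop := ∀ (jil_dict : List (Int × Int)), Dom_jil_key_order jil_dict → Spec_jil_key_order jil_dict (jil_key_order jil_dict)

-- ===== LEMMAS AND PROOFS =====

-- A's partition loop, characterised as three filters appended to the accumulators.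
theorem pv_tri_foldl (l : List Int) (a b c : List Int) :
    l.foldl
      (fun (acc : List Int × List Int × List Int) k =>
        if k < 20000 then (acc.1 ++ [k], acc.2.1, acc.2.2)
        else if k < 30000 then (acc.1, acc.2.1, acc.2.2 ++ [k])
        else (acc.1, acc.2.1 ++ [k], acc.2.2))
      (a, b, c)
    = (a ++ l.filter (fun k => decide (k < 20000)),
       b ++ l.filter (fun k => decide (¬ k < 20000 ∧ ¬ k < 30000)),
       c ++ l.filter (fun k => decide (¬ k < 20000 ∧ k < 30000))) := by
  induction l generalizing a b c with
  | nil => simp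
  | cons x t ih =>
    simp only [List.foldl_cons]
    split_ifs with h1 h2 <;> rw [ih] <;> simp [List.filter_cons, *]

-- sorted2 with integer keys is sorted with the lexicographic pair key.
theorem pv_sorted2_eq_sorted_lex (xs : List Int) (k1 : Int → Int) :
    PySem.List.sorted2 xs k1 (fun k => k) false
      = PySem.List.sorted xs (fun k => toLex (k1 k, k)) false := by
  show xs.foldl (fun acc x => PySem.List.insertBy _ x acc) []
      = xs.foldl (fun acc x => PySem.List.insertBy _ x acc) []
  have hpred : (fun a b : Int => decide (k1 a < k1 b) || (!decide (k1 b < k1 a) && decide (a < b)))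
      = (fun a b : Int => decide (toLex (k1 a, a) < toLex (k1 b, b))) := by
    funext a b
    by_cases h : k1 a < k1 b
    · simp [h, Prod.Lex.lt_iff]
    · by_cases h' : k1 b < k1 a
      · simp [h', Prod.Lex.lt_iff]
        omega
      · have : k1 a = k1 b := le_antisymm (not_lt.mp h') (not_lt.mp h)
        simp [Prod.Lex.lt_iff, this]
  rw [hpred]

-- the three filtered segments together are a permutation of the list
theorem pv_filter_tri_perm (s : List Int) :
    (s.filter (fun k => decide (k < 20000))
      ++ s.filter (fun k => decide (¬ k < 20000 ∧ ¬ k < 30000))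
      ++ s.filter (fun k => decide (¬ k < 20000 ∧ k < 30000))).Perm s := by
  have h1 : (s.filter (fun k => decide (k < 20000))
      ++ s.filter (fun k => !decide (k < 20000))).Perm s :=
    List.filter_append_perm _ s
  have h2 : ((s.filter (fun k => !decide (k < 20000))).filter (fun k => !decide (k < 30000))
      ++ (s.filter (fun k => !decide (k < 20000))).filter (fun k => !(!decide (k < 30000)))).Perm
      (s.filter (fun k => !decide (k < 20000))) :=
    List.filter_append_perm _ _
  have e1 : (s.filter (fun k => !decide (k < 20000))).filter (fun k => !decide (k < 30000))
      = s.filter (fun k => decide (¬ k < 20000 ∧ ¬ k < 30000)) := by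
    rw [List.filter_filter]; apply List.filter_congr; intro x _
    by_cases h20 : x < 20000 <;> by_cases h30 : x < 30000 <;> simp [h20, h30]
  have e2 : (s.filter (fun k => !decide (k < 20000))).filter (fun k => !(!decide (k < 30000)))
      = s.filter (fun k => decide (¬ k < 20000 ∧ k < 30000)) := by
    rw [List.filter_filter]; apply List.filter_congr; intro x _
    by_cases h20 : x < 20000 <;> by_cases h30 : x < 30000 <;> simp [h20, h30]
  rw [e1, e2] at h2
  have h3 := (List.Perm.append_left (s.filter (fun k => decide (k < 20000))) h2).trans h1
  simpa [List.append_assoc] using h3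

theorem jil_spec_aux (jil_dict : List (Int × Int)) :
    jil_key_order jil_dict = jil_key_order_alt jil_dict := by
  have hB : jil_key_order_alt jil_dict
      = PySem.List.sorted (PySem.Dict.ofList jil_dict).keys
          (fun k => toLex ((if k < 20000 then (0 : Int) else if k < 30000 then 2 else 1), k)) false :=
    pv_sorted2_eq_sorted_lex _ _
  have hnd : (PySem.Dict.ofList jil_dict).keys.Nodup := PySem.Dict.nodup_keys_ofList jil_dict
  have hA : jil_key_order jil_dict
      = (((PySem.List.sorted (PySem.Dict.ofList jil_dict).keys (fun k => k) false).foldl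
          (fun (acc : List Int × List Int × List Int) k =>
            if k < 20000 then (acc.1 ++ [k], acc.2.1, acc.2.2)
            else if k < 30000 then (acc.1, acc.2.1, acc.2.2 ++ [k])
            else (acc.1, acc.2.1 ++ [k], acc.2.2)) ([], [], [])).1
        ++ ((PySem.List.sorted (PySem.Dict.ofList jil_dict).keys (fun k => k) false).foldl
          (fun (acc : List Int × List Int × List Int) k =>
            if k < 20000 then (acc.1 ++ [k], acc.2.1, acc.2.2)
            else if k < 30000 then (acc.1, acc.2.1, acc.2.2 ++ [k])
            else (acc.1, acc.2.1 ++ [k], acc.2.2)) ([], [], [])).2.1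
        ++ ((PySem.List.sorted (PySem.Dict.ofList jil_dict).keys (fun k => k) false).foldl
          (fun (acc : List Int × List Int × List Int) k =>
            if k < 20000 then (acc.1 ++ [k], acc.2.1, acc.2.2)
            else if k < 30000 then (acc.1, acc.2.1, acc.2.2 ++ [k])
            else (acc.1, acc.2.1 ++ [k], acc.2.2)) ([], [], [])).2.2) := rfl
  rw [hA, hB, pv_tri_foldl]
  simp only [List.nil_append]
  set s := PySem.List.sorted (PySem.Dict.ofList jil_dict).keys (fun k => k) false with hs
  have hperm : s.Perm (PySem.Dict.ofList jil_dict).keys := PySem.List.sorted_perm _ _ false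
  have hsnd : s.Nodup := hperm.nodup_iff.mpr hnd
  have hle : s.Pairwise (fun a b : Int => a ≤ b) := PySem.List.sorted_pairwise _ _
  have hlt : s.Pairwise (fun a b : Int => a < b) :=
    (hle.and hsnd).imp (fun h => lt_of_le_of_ne h.1 h.2)
  apply Eq.symm
  apply PySem.List.sorted_eq_of_perm_of_pairwise_lt
  · exact (pv_filter_tri_perm s).trans hperm
  · -- the concatenation is strictly increasing in the lexicographic key
    have key_lt : ∀ x y : Int,
        (x < 20000 ∧ y < 20000 ∧ x < y) ∨
        (x < 20000 ∧ ¬ y < 20000) ∨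
        (¬ x < 20000 ∧ ¬ x < 30000 ∧ ¬ y < 20000 ∧ ¬ y < 30000 ∧ x < y) ∨
        (¬ x < 30000 ∧ ¬ y < 20000 ∧ y < 30000) ∨
        (¬ x < 20000 ∧ x < 30000 ∧ ¬ y < 20000 ∧ y < 30000 ∧ x < y) ∨
        (x < 20000 ∧ ¬ y < 20000 ∧ y < 30000) →
        toLex ((if x < 20000 then (0 : Int) else if x < 30000 then 2 else 1), x)
          < toLex ((if y < 20000 then (0 : Int) else if y < 30000 then 2 else 1), y) := by
      intro x y h
      rw [Prod.Lex.lt_iff]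
      simp only [ofLex_toLex]
      split_ifs <;> omega
    have mem0 : ∀ x ∈ s.filter (fun k => decide (k < 20000)), x < 20000 := by
      intro x hx; exact of_decide_eq_true (List.mem_filter.mp hx).2
    have mem1 : ∀ x ∈ s.filter (fun k => decide (¬ k < 20000 ∧ ¬ k < 30000)),
        ¬ x < 20000 ∧ ¬ x < 30000 := by
      intro x hx; exact of_decide_eq_true (List.mem_filter.mp hx).2
    have mem2 : ∀ x ∈ s.filter (fun k => decide (¬ k < 20000 ∧ k < 30000)),
        ¬ x < 20000 ∧ x < 30000 := by
      intro x hx; exact of_decide_eq_true (List.mem_filter.mp hx).2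
    rw [List.pairwise_append]
    refine ⟨?_, ?_, ?_⟩
    · rw [List.pairwise_append]
      refine ⟨?_, ?_, ?_⟩
      · exact (hlt.filter _).imp_of_mem (fun ha hb h =>
          key_lt _ _ (Or.inl ⟨mem0 _ ha, mem0 _ hb, h⟩))
      · exact (hlt.filter _).imp_of_mem (fun ha hb h =>
          key_lt _ _ (Or.inr (Or.inr (Or.inl
            ⟨(mem1 _ ha).1, (mem1 _ ha).2, (mem1 _ hb).1, (mem1 _ hb).2, h⟩))))
      · intro x hx y hy
        exact key_lt _ _ (Or.inr (Or.inl ⟨mem0 _ hx, (mem1 _ hy).1⟩))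
    · exact (hlt.filter _).imp_of_mem (fun ha hb h =>
        key_lt _ _ (Or.inr (Or.inr (Or.inr (Or.inr (Or.inl
          ⟨(mem2 _ ha).1, (mem2 _ ha).2, (mem2 _ hb).1, (mem2 _ hb).2, h⟩))))))
    · intro x hx y hy
      rcases List.mem_append.mp hx with hx | hx
      · exact key_lt _ _ (Or.inr (Or.inr (Or.inr (Or.inr (Or.inr
          ⟨mem0 _ hx, (mem2 _ hy).1, (mem2 _ hy).2⟩)))))
      · exact key_lt _ _ (Or.inr (Or.inr (Or.inr (Or.inl
          ⟨(mem1 _ hx).2, (mem2 _ hy).1, (mem2 _ hy).2⟩))))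

-- ===== VERDICT (by name: the statement is the Claim_ definition above) =====
theorem jil_key_order_spec : Claim_equal_jil_key_order := by
  intro jil_dict _
  unfold Spec_jil_key_order
  exact jil_spec_aux jil_dict
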